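-- pv_equiv track=rewrite | github.com/Stormtorch002/lunabot | coderesponders.py | split_text
-- ===== SOURCE A (Python) =====
-- def split_text(text, separator):
--     pieces = []
--     current_piece = []
--     inside_quotes = False
--     i = 0
--
--     while i < len(text):
--         if text[i] == '"' and not inside_quotes:
--             inside_quotes = True
--             i += 1  # Skip the quote
--             continue
--         elif text[i] == '"' and inside_quotes:
--             inside_quotes = False
--             i += 1  # Skip the quote
--             continue
--
--         if not inside_quotes and text[i:i+len(separator)] == separator:
--             pieces.append(''.join(current_piece))
--             current_piece = []
--             i += len(separator) - 1  # Adjust for separator length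
--         else:
--             current_piece.append(text[i])
--
--         i += 1
--
--     # Add the last piece
--     if current_piece:
--         pieces.append(''.join(current_piece))
--
--     return pieces
-- ===== SOURCE B (Python) =====
-- def split_text(text, separator):
--     n, m = len(text), len(separator)
--     # phase 1: one quote-aware scan recording the start index of each separator hit
--     bounds = []
--     inside = False
--     i = 0
--     while i < n:
--         if text[i] == '"':
--             inside = not inside
--             i += 1
--         elif not inside and text[i:i+m] == separator:
--             bounds.append(i)
--             i += m
--         else:
--             i += 1
--     # phase 2: slice the raw segments and strip the quote characters
--     segs = []
--     prev = 0
--     for b in bounds: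
--         segs.append(text[prev:b])
--         prev = b + m
--     segs.append(text[prev:])
--     pieces = [''.join(c for c in seg if c != '"') for seg in segs]
--     if pieces[-1] == '':
--         pieces.pop()
--     return pieces
-- ===== Notes on version B (the rewrite author's own statement) =====
-- stated objective: alternative
-- what changed: B replaces A's piece-accumulating scan by a two-phase algorithm: one quote-aware scan records only the separator boundary indices, then the text is sliced at those boundaries into raw segments whose quote characters are stripped in bulk per segment.
-- outside the precondition, e.g. on split_text('"ab"', ''): A returns ['ab'], B returns ['ab']
import Mathlib
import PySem

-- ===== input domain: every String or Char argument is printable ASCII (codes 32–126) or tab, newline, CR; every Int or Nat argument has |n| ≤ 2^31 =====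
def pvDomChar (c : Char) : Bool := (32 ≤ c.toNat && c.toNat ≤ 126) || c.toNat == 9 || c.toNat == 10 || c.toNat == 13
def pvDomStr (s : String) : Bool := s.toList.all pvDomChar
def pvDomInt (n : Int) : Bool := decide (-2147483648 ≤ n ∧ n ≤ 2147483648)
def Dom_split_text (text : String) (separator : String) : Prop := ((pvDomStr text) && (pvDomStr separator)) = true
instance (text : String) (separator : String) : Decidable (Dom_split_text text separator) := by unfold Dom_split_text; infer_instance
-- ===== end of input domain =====

-- B replaces A's piece-accumulating scan by a two-phase algorithm (record separator boundary
-- indices in one quote-aware scan, then slice the raw segments and strip their quote characters);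
-- same asymptotic cost ("alternative"). Pre_ excludes the empty separator, on which A diverges
-- for most texts.


-- ===== PORT A =====
-- A's while-loop; fuel = text length (each iteration advances i by ≥ 1 since Pre_ gives a
-- nonempty separator, so fuel never runs out inside Pre_; fuel 0 mirrors loop exit).
def splitA_loop (cs sep : List Char) : Nat → List String → List Char → Bool → Nat → List String
  | 0, pieces, cur, _, _ => if cur ≠ [] then pieces ++ [String.ofList cur] else pieces
  | fuel+1, pieces, cur, inside, i =>
    if i < cs.length then
      if cs.getD i ' ' = '"' ∧ inside = false then
        splitA_loop cs sep fuel pieces cur true (i+1)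
      else if cs.getD i ' ' = '"' ∧ inside = true then
        splitA_loop cs sep fuel pieces cur false (i+1)
      else if inside = false ∧ PySem.List.slice cs (some (i:Int)) (some ((i:Int)+(sep.length:Int))) = sep then
        splitA_loop cs sep fuel (pieces ++ [String.ofList cur]) [] inside (i + sep.length)
      else
        splitA_loop cs sep fuel pieces (cur ++ [cs.getD i ' ']) inside (i+1)
    else if cur ≠ [] then pieces ++ [String.ofList cur] else pieces

def split_text (text : String) (separator : String) : List String :=
  splitA_loop text.toList separator.toList text.toList.length [] [] false 0

-- ===== PORT B =====
-- ''.join(c for c in seg if c != '"')  (quote removal per segment)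
def filterQ (s : List Char) : List Char := s.filter (fun c => c != '"')

-- phase 1: quote-aware scan recording separator start indices (same fuel convention as A's loop)
def splitB_bounds (cs sep : List Char) : Nat → Bool → Nat → List Nat → List Nat
  | 0, _, _, bounds => bounds
  | fuel+1, inside, i, bounds =>
    if i < cs.length then
      if cs.getD i ' ' = '"' then
        splitB_bounds cs sep fuel (!inside) (i+1) bounds
      else if inside = false ∧ PySem.List.slice cs (some (i:Int)) (some ((i:Int)+(sep.length:Int))) = sep then
        splitB_bounds cs sep fuel inside (i + sep.length) (bounds ++ [i])
      else
        splitB_bounds cs sep fuel inside (i+1) bounds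
    else bounds

-- phase 2: slice raw segments at the boundaries, strip quotes, drop a trailing empty piece
def splitB_phase2 (cs : List Char) (m : Nat) (bounds : List Nat) : List String :=
  let sp := bounds.foldl (fun (st : List (List Char) × Nat) (b : Nat) =>
      (st.1 ++ [PySem.List.slice cs (some (st.2:Int)) (some (b:Int))], b + m)) ([], 0)
  let segs := sp.1 ++ [PySem.List.slice cs (some (sp.2:Int)) none]
  let pieces := segs.map (fun s => String.ofList (filterQ s))
  if pieces.getLast? = some "" then pieces.dropLast else pieces

def split_text_alt (text : String) (separator : String) : List String :=
  splitB_phase2 text.toList separator.toList.length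
    (splitB_bounds text.toList separator.toList text.toList.length false 0 [])

-- ===== PRECONDITION & SPEC =====
-- Pre_ excludes only the empty separator, on which A loops forever whenever any character of the
-- text lies outside quotes (B's loop likewise); no other input is excluded.
def Pre_split_text (text : String) (separator : String) : Prop := separator ≠ ""
instance (text : String) (separator : String) : Decidable (Pre_split_text text separator) := by
  unfold Pre_split_text; infer_instance

def pvWitness_split_text : String × String := ("a,\"b,c\",d", ",")

def Spec_split_text (text : String) (separator : String) (out : List String) : Prop := out = split_text_alt text separator
instance (text : String) (separator : String) (out : List String) : Decidable (Spec_split_text text separator out) := by unfold Spec_split_text; infer_instance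

-- ===== CLAIM (what is proved, stated in full; the proofs are below) =====
def Claim_equal_split_text : Prop := ∀ (text : String) (separator : String), Dom_split_text text separator → Pre_split_text text separator → Spec_split_text text separator (split_text text separator)

-- ===== LEMMAS AND PROOFS =====

-- reference assembly: the pieces both programs produce from a boundary list, recursively
def asmb (cs : List Char) (m : Nat) : Nat → List Nat → List String
  | prev, [] =>
    if filterQ (cs.drop prev) = [] then [] else [String.ofList (filterQ (cs.drop prev))]
  | prev, b :: bs =>
    String.ofList (filterQ ((cs.drop prev).take (b - prev))) :: asmb cs m (b+m) bs

-- phase-2 core before the trailing-empty drop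
def core (cs : List Char) (m : Nat) : Nat → List Nat → List String
  | prev, [] => [String.ofList (filterQ (cs.drop prev))]
  | prev, b :: bs =>
    String.ofList (filterQ ((cs.drop prev).take (b - prev))) :: core cs m (b+m) bs

lemma splitB_bounds_acc (cs sep : List Char) :
    ∀ fuel inside i bounds, splitB_bounds cs sep fuel inside i bounds
      = bounds ++ splitB_bounds cs sep fuel inside i [] := by
  intro fuel
  induction fuel with
  | zero => intro inside i bounds; simp [splitB_bounds]
  | succ f ih =>
    intro inside i bounds
    simp only [splitB_bounds]
    by_cases h1 : i < cs.length
    · simp only [if_pos h1]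
      by_cases h2 : cs.getD i ' ' = '"'
      · simp only [if_pos h2]; exact ih (!inside) (i+1) bounds
      · simp only [if_neg h2]
        by_cases h3 : inside = false ∧ PySem.List.slice cs (some (i:Int)) (some ((i:Int)+(sep.length:Int))) = sep
        · simp only [if_pos h3]
          rw [ih inside (i + sep.length) (bounds ++ [i]), ih inside (i + sep.length) ([] ++ [i])]
          simp
        · simp only [if_neg h3]; exact ih inside (i+1) bounds
    · simp [if_neg h1]

lemma take_ext (cs : List Char) (prev i : Nat) (h1 : prev ≤ i) (h2 : i < cs.length) :
    (cs.drop prev).take (i+1 - prev) = (cs.drop prev).take (i - prev) ++ [cs.getD i ' '] := by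
  rw [show i + 1 - prev = (i - prev) + 1 from by omega, List.take_add_one, List.getElem?_drop,
      show prev + (i - prev) = i from by omega, List.getElem?_eq_getElem h2]
  simp [List.getElem?_eq_getElem h2]

lemma take_all (cs : List Char) (prev i : Nat) (h : cs.length ≤ i) :
    (cs.drop prev).take (i - prev) = cs.drop prev := by
  apply List.take_of_length_le
  rw [List.length_drop]
  omega

lemma main_loop (cs sep : List Char) (hm : 1 ≤ sep.length) :
    ∀ fuel i prev inside (pieces : List String), prev ≤ i → cs.length ≤ i + fuel →
      splitA_loop cs sep fuel pieces (filterQ ((cs.drop prev).take (i - prev))) inside i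
        = pieces ++ asmb cs sep.length prev (splitB_bounds cs sep fuel inside i []) := by
  intro fuel
  induction fuel with
  | zero =>
    intro i prev inside pieces h1 h2
    rw [take_all cs prev i (by omega)]
    simp only [splitA_loop, splitB_bounds, asmb]
    by_cases hf : filterQ (cs.drop prev) = [] <;> simp [hf]
  | succ f ih =>
    intro i prev inside pieces h1 h2
    by_cases hi : i < cs.length
    · by_cases hq : cs[i]?.getD ' ' = '"'
      · have hcur : filterQ ((cs.drop prev).take (i + 1 - prev))
            = filterQ ((cs.drop prev).take (i - prev)) := by
          rw [take_ext cs prev i h1 hi]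
          simp [filterQ, hq]
        cases inside with
        | false =>
          have h := ih (i+1) prev true pieces (by omega) (by omega)
          rw [hcur] at h
          simp only [splitA_loop, splitB_bounds, if_pos hi]
          simpa [hq] using h
        | true =>
          have h := ih (i+1) prev false pieces (by omega) (by omega)
          rw [hcur] at h
          simp only [splitA_loop, splitB_bounds, if_pos hi]
          simpa [hq] using h
      · by_cases hs : inside = false ∧ PySem.List.slice cs (some (i:Int)) (some ((i:Int)+(sep.length:Int))) = sep
        · obtain ⟨hins, hsl⟩ := hs
          subst hins
          have hx := ih (i + sep.length) (i + sep.length) false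
            (pieces ++ [String.ofList (filterQ ((cs.drop prev).take (i - prev)))])
            (le_refl _) (by omega)
          simp only [Nat.sub_self, List.take_zero, show filterQ [] = [] from rfl] at hx
          simp only [splitA_loop, splitB_bounds, if_pos hi]
          rw [splitB_bounds_acc cs sep f false (i + sep.length) ([] ++ [i])]
          simp [hq, hsl, asmb, hx, List.append_assoc]
        · have hcur : filterQ ((cs.drop prev).take (i + 1 - prev))
              = filterQ ((cs.drop prev).take (i - prev)) ++ [cs.getD i ' '] := by
            rw [take_ext cs prev i h1 hi]
            simp [filterQ, List.filter_append, hq]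
          have h := ih (i+1) prev inside pieces (by omega) (by omega)
          rw [hcur] at h
          simp only [splitA_loop, splitB_bounds, if_pos hi]
          simpa [hq, hs] using h
    · rw [take_all cs prev i (by omega)]
      simp only [splitA_loop, splitB_bounds, asmb, if_neg hi]
      by_cases hf : filterQ (cs.drop prev) = [] <;> simp [hf]

lemma core_ne_nil (cs : List Char) (m : Nat) (prev : Nat) (bs : List Nat) :
    core cs m prev bs ≠ [] := by
  cases bs <;> simp [core]

lemma pop_cons (x : String) (l : List String) (h : l ≠ []) :
    (if (x :: l).getLast? = some "" then (x :: l).dropLast else x :: l)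
      = x :: (if l.getLast? = some "" then l.dropLast else l) := by
  cases l with
  | nil => exact absurd rfl h
  | cons y ys =>
    rw [List.getLast?_cons_cons]
    split_ifs with h1
    · exact List.dropLast_cons₂
    · rfl

lemma core_pop (cs : List Char) (m : Nat) :
    ∀ bs prev, (if (core cs m prev bs).getLast? = some "" then (core cs m prev bs).dropLast
        else core cs m prev bs) = asmb cs m prev bs := by
  intro bs
  induction bs with
  | nil =>
    intro prev
    simp only [core, asmb]
    by_cases hf : filterQ (cs.drop prev) = [] <;>
      simp [hf, String.ofList_eq_empty_iff]
  | cons b bs ihb =>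
    intro prev
    simp only [core, asmb]
    rw [pop_cons _ _ (core_ne_nil cs m (b+m) bs), ihb (b+m)]

lemma segs_fold (cs : List Char) (m : Nat) :
    ∀ (bs : List Nat) (segs : List (List Char)) (prev : Nat),
      (((bs.foldl (fun (st : List (List Char) × Nat) (b : Nat) =>
          (st.1 ++ [(cs.drop st.2).take (b - st.2)], b + m)) (segs, prev)).1
        ++ [cs.drop ((bs.foldl (fun (st : List (List Char) × Nat) (b : Nat) =>
          (st.1 ++ [(cs.drop st.2).take (b - st.2)], b + m)) (segs, prev)).2)]).map
          (fun s => String.ofList (filterQ s)))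
        = segs.map (fun s => String.ofList (filterQ s)) ++ core cs m prev bs := by
  intro bs
  induction bs with
  | nil => intro segs prev; simp [core]
  | cons b bs ihb =>
    intro segs prev
    simp only [List.foldl_cons]
    rw [ihb (segs ++ [(cs.drop prev).take (b - prev)]) (b + m)]
    simp [core, List.append_assoc]

lemma phase2_eq_core (cs : List Char) (m : Nat) (bs : List Nat) :
    splitB_phase2 cs m bs = (if (core cs m 0 bs).getLast? = some "" then (core cs m 0 bs).dropLast
        else core cs m 0 bs) := by
  simp only [splitB_phase2, PySem.List.slice_natCast, PySem.List.slice_from_natCast]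
  have h := segs_fold cs m bs [] 0
  simp only [List.map_nil, List.nil_append] at h
  rw [h]

-- ===== VERDICT (by name: the statement is the Claim_ definition above) =====
theorem split_text_spec : Claim_equal_split_text := by
  intro text separator _ hpre
  unfold Pre_split_text at hpre
  unfold Spec_split_text split_text split_text_alt
  rw [phase2_eq_core, core_pop]
  have hsep : separator.toList ≠ [] := fun h => hpre (String.toList_eq_nil_iff.mp h)
  have h := main_loop text.toList separator.toList (List.length_pos_of_ne_nil hsep)
    text.toList.length 0 0 false [] (le_refl 0) (by omega)
  simpa [filterQ] using h
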